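-- pv_equiv track=rewrite | github.com/AS-UR-a/problem_solve | math.py | delta_table
-- ===== SOURCE A (Python) =====
-- def delta_table(cost, basis, u, v):
--     m, n = len(cost), len(cost[0])
--     deltas = [[None] * n for _ in range(m)]
--     is_optimal = True
--     min_delta = 0
--     min_cell = None
--
--     for i in range(m):
--         for j in range(n):
--             if (i, j) in basis:
--                 deltas[i][j] = 0
--                 continue
--             if u[i] is None or v[j] is None:
--                 deltas[i][j] = None
--                 continue
--             delta = cost[i][j] - u[i] - v[j]
--             deltas[i][j] = delta
--             if delta < 0:
--                 is_optimal = False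
--                 if delta < min_delta:
--                     min_delta = delta
--                     min_cell = (i, j)
--     return deltas, is_optimal, min_cell, min_delta
-- ===== SOURCE B (Python) =====
-- def delta_table(cost, basis, u, v):
--     m, n = len(cost), len(cost[0])
--     deltas = [[0 if (i, j) in basis
--                else None if u[i] is None or v[j] is None
--                else cost[i][j] - u[i] - v[j]
--                for j in range(n)] for i in range(m)]
--     negatives = [(d, (i, j))
--                  for i, row in enumerate(deltas)
--                  for j, d in enumerate(row)
--                  if d is not None and d < 0]
--     if not negatives:
--         return deltas, True, None, 0
--     min_delta, min_cell = min(negatives, key=lambda t: t[0])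
--     return deltas, False, min_cell, min_delta
-- ===== Notes on version B (the rewrite author's own statement) =====
-- stated objective: idiomatic
-- what changed: B has no running accumulator at all: it builds the deltas table declaratively with a nested comprehension, collects the negative entries into a candidate list with a filtering comprehension, and obtains the minimum cell with the min() builtin (first minimum on ties) and optimality as emptiness of that list, whereas A mutates a preallocated table while threading is_optimal/min_cell/min_delta state through fused loops.
import Mathlib
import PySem

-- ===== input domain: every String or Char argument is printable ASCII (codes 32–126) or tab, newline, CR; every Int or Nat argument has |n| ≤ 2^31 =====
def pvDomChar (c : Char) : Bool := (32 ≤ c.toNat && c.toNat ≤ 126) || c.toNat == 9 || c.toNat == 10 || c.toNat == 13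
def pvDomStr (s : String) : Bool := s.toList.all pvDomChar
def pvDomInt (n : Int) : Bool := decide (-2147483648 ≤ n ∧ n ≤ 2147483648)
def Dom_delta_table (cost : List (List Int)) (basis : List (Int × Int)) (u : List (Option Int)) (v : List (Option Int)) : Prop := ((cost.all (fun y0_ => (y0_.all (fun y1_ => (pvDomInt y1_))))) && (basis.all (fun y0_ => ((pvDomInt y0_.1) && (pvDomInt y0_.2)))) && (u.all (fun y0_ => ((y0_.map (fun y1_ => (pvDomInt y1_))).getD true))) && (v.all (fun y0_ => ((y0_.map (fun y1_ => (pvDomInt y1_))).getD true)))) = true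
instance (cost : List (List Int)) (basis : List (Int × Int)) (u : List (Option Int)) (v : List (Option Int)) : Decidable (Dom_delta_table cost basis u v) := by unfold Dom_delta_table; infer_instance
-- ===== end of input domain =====

-- B is accumulator-free: it builds the deltas table with a nested comprehension, collects the
-- negative entries into a candidate list, and gets optimality/min cell from emptiness and the
-- min() builtin (first minimum on ties) instead of A's fused mutate-and-track loops (idiomatic).

-- ===== PORT A =====
-- A-side helper: the body of A's inner `for j` loop (state: row built so far, is_optimal, min_cell, min_delta).
-- out-of-range u[i]/v[j]/cost[i][j] (an IndexError in Python) are read with a default; Pre_ excludes those inputs.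
def pvAInner (cost : List (List Int)) (basis : List (Int × Int)) (u : List (Option Int)) (v : List (Option Int)) (i : Nat)
    (st : List (Option Int) × Bool × Option (Int × Int) × Int) (j : Nat) :
    List (Option Int) × Bool × Option (Int × Int) × Int :=
  if ((i : Int), (j : Int)) ∈ basis then (st.1 ++ [some 0], st.2.1, st.2.2.1, st.2.2.2)
  else
    match PySem.List.pyGetD u (i : Int) none with
    | none => (st.1 ++ [none], st.2.1, st.2.2.1, st.2.2.2)
    | some ui =>
      match PySem.List.pyGetD v (j : Int) none with
      | none => (st.1 ++ [none], st.2.1, st.2.2.1, st.2.2.2)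
      | some vj =>
        let d := PySem.List.pyGetD (PySem.List.pyGetD cost (i : Int) []) (j : Int) 0 - ui - vj
        if d < 0 then
          (st.1 ++ [some d], false,
           (if d < st.2.2.2 then some ((i : Int), (j : Int)) else st.2.2.1),
           (if d < st.2.2.2 then d else st.2.2.2))
        else (st.1 ++ [some d], st.2.1, st.2.2.1, st.2.2.2)

-- A-side helper: the body of A's outer `for i` loop.
def pvAOuter (cost : List (List Int)) (basis : List (Int × Int)) (u : List (Option Int)) (v : List (Option Int)) (n : Nat)
    (st : List (List (Option Int)) × Bool × Option (Int × Int) × Int) (i : Nat) :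
    List (List (Option Int)) × Bool × Option (Int × Int) × Int :=
  let r := (List.range n).foldl (pvAInner cost basis u v i) ([], st.2.1, st.2.2.1, st.2.2.2)
  (st.1 ++ [r.1], r.2.1, r.2.2.1, r.2.2.2)

def delta_table (cost : List (List Int)) (basis : List (Int × Int)) (u : List (Option Int)) (v : List (Option Int)) : List (List (Option Int)) × Bool × (Option (Int × Int)) × Int :=
  let m := cost.length
  let n := (PySem.List.pyGetD cost 0 []).length   -- len(cost[0]); cost = [] raises in Python, excluded by Pre_
  (List.range m).foldl (pvAOuter cost basis u v n) ([], true, none, 0)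

-- ===== PORT B =====
-- B's cell expression: `0 if (i,j) in basis else None if u[i] is None or v[j] is None else cost[i][j]-u[i]-v[j]`
def pvCellB (cost : List (List Int)) (basis : List (Int × Int)) (u : List (Option Int)) (v : List (Option Int)) (i j : Nat) : Option Int :=
  if ((i : Int), (j : Int)) ∈ basis then some 0
  else
    match PySem.List.pyGetD u (i : Int) none, PySem.List.pyGetD v (j : Int) none with
    | some ui, some vj => some (PySem.List.pyGetD (PySem.List.pyGetD cost (i : Int) []) (j : Int) 0 - ui - vj)
    | _, _ => none

def delta_table_alt (cost : List (List Int)) (basis : List (Int × Int)) (u : List (Option Int)) (v : List (Option Int)) : List (List (Option Int)) × Bool × (Option (Int × Int)) × Int :=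
  let m := cost.length
  let n := (PySem.List.pyGetD cost 0 []).length
  let deltas := (List.range m).map (fun i => (List.range n).map (pvCellB cost basis u v i))
  -- negatives = [(d, (i, j)) for i, row in enumerate(deltas) for j, d in enumerate(row) if d is not None and d < 0]
  let negatives := (PySem.List.enumerate deltas 0).flatMap (fun p =>
    (PySem.List.enumerate p.2 0).filterMap (fun q =>
      match q.2 with
      | some d => if d < 0 then some (d, (p.1, q.1)) else none
      | none => none))
  if negatives = [] then (deltas, true, none, 0)
  else
    match PySem.List.min? negatives (fun t => t.1) with
    | some t => (deltas, false, some t.2, t.1)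
    | none => (deltas, true, none, 0)   -- unreachable: min? is none only on []

-- ===== PRECONDITION & SPEC =====
-- Pre_ is exactly where Python A returns: cost nonempty, and every visited non-basis cell
-- reads u[i], then (if u[i] is not None) v[j], then (if v[j] is not None) cost[i][j] in range.
def pvPreCellOk (cost : List (List Int)) (basis : List (Int × Int)) (u : List (Option Int)) (v : List (Option Int)) (i j : Nat) : Bool :=
  decide (((i : Int), (j : Int)) ∈ basis) ||
    (decide (i < u.length) && (decide (u.getD i none = none) ||
      (decide (j < v.length) && (decide (v.getD j none = none) ||
        decide (j < (cost.getD i []).length)))))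

def Pre_delta_table (cost : List (List Int)) (basis : List (Int × Int)) (u : List (Option Int)) (v : List (Option Int)) : Prop :=
  cost ≠ [] ∧
  ∀ i < cost.length, ∀ j < (cost.headD []).length, pvPreCellOk cost basis u v i j = true
instance (cost : List (List Int)) (basis : List (Int × Int)) (u : List (Option Int)) (v : List (Option Int)) : Decidable (Pre_delta_table cost basis u v) := by unfold Pre_delta_table; infer_instance

def pvWitness_delta_table : List (List Int) × (List (Int × Int)) × List (Option Int) × List (Option Int) :=
  ([[1, 2], [3, 4]], [((0 : Int), (0 : Int)), (1, 1)], [some 0, some 1], [some 1, some 3])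

def Spec_delta_table (cost : List (List Int)) (basis : List (Int × Int)) (u : List (Option Int)) (v : List (Option Int)) (out : List (List (Option Int)) × Bool × (Option (Int × Int)) × Int) : Prop := out = delta_table_alt cost basis u v
instance (cost : List (List Int)) (basis : List (Int × Int)) (u : List (Option Int)) (v : List (Option Int)) (out : List (List (Option Int)) × Bool × (Option (Int × Int)) × Int) : Decidable (Spec_delta_table cost basis u v out) := by unfold Spec_delta_table; infer_instance

-- ===== CLAIM (what is proved, stated in full; the proofs are below) =====
def Claim_equal_delta_table : Prop := ∀ (cost : List (List Int)) (basis : List (Int × Int)) (u : List (Option Int)) (v : List (Option Int)), Dom_delta_table cost basis u v → Pre_delta_table cost basis u v → Spec_delta_table cost basis u v (delta_table cost basis u v)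

-- ===== LEMMAS AND PROOFS =====

-- proof-side view of A's scan update on one (cell, value) pair
def pvMerge (st : Bool × Option (Int × Int) × Int) (q : (Int × Int) × Option Int) :
    Bool × Option (Int × Int) × Int :=
  match q.2 with
  | some d =>
    if d < 0 then
      (false, (if d < st.2.2 then some q.1 else st.2.1), (if d < st.2.2 then d else st.2.2))
    else st
  | none => st

-- proof-side filter that extracts a negative candidate from a (cell, value) pair
def pvNeg (q : (Int × Int) × Option Int) : Option (Int × (Int × Int)) :=
  match q.2 with
  | some d => if d < 0 then some (d, q.1) else none
  | none => none

-- merge specialised to candidates that are known negative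
def pvMergeNeg (st : Bool × Option (Int × Int) × Int) (p : Int × (Int × Int)) :
    Bool × Option (Int × Int) × Int :=
  (false, (if p.1 < st.2.2 then some p.2 else st.2.1), (if p.1 < st.2.2 then p.1 else st.2.2))

-- the abstraction between min?'s accumulator and A's scan state
def pvConv (acc : Option (Int × (Int × Int))) : Bool × Option (Int × Int) × Int :=
  match acc with
  | none => (true, none, 0)
  | some p => (false, some p.2, p.1)

-- enumerate of a mapped range is the range paired with the mapped values
lemma pv_enum_range' {α : Type} (f : Nat → α) :
    ∀ (n a : Nat), PySem.List.enumerate ((List.range' a n).map f) (a : Int)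
      = (List.range' a n).map (fun (k : Nat) => ((k : Int), f k)) := by
  intro n
  induction n with
  | zero => intro a; simp [PySem.List.enumerate_nil]
  | succ n ih =>
    intro a
    simp only [List.range'_succ, List.map_cons, PySem.List.enumerate_cons]
    have := ih (a + 1)
    push_cast at this ⊢
    rw [this]

lemma pv_enum_range {α : Type} (f : Nat → α) (n : Nat) :
    PySem.List.enumerate ((List.range n).map f) 0
      = (List.range n).map (fun (k : Nat) => ((k : Int), f k)) := by
  have := pv_enum_range' f n 0
  simpa [List.range_eq_range'] using this

-- one step of A's inner loop = append the B cell and merge the (cell, value) pair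
lemma pv_step_eq (cost : List (List Int)) (basis : List (Int × Int)) (u : List (Option Int)) (v : List (Option Int))
    (i j : Nat) (row : List (Option Int)) (s : Bool × Option (Int × Int) × Int) :
    pvAInner cost basis u v i (row, s) j
      = (row ++ [pvCellB cost basis u v i j],
         pvMerge s ((((i : Int), (j : Int))), pvCellB cost basis u v i j)) := by
  unfold pvAInner pvCellB pvMerge
  by_cases hb : ((i : Int), (j : Int)) ∈ basis
  · simp [hb]
  · simp only [hb, if_false]
    cases hu : PySem.List.pyGetD u (i : Int) none with
    | none => simp
    | some ui =>
      cases hv : PySem.List.pyGetD v (j : Int) none with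
      | none => simp
      | some vj =>
        simp only []
        split_ifs <;> simp_all

-- A's inner loop = the B row (cells appended) plus pvMerge folded over the row's cell pairs
lemma pv_inner_eq (cost : List (List Int)) (basis : List (Int × Int)) (u : List (Option Int)) (v : List (Option Int)) (i : Nat) :
    ∀ (js : List Nat) (row : List (Option Int)) (s : Bool × Option (Int × Int) × Int),
      js.foldl (pvAInner cost basis u v i) (row, s)
        = (row ++ js.map (pvCellB cost basis u v i),
           (js.map (fun (j : Nat) => ((((i : Int), (j : Int))), pvCellB cost basis u v i j))).foldl pvMerge s) := by
  intro js
  induction js with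
  | nil => intro row s; simp
  | cons j js ih =>
    intro js_row s
    simp only [List.foldl_cons, pv_step_eq, ih, List.map_cons, List.append_assoc,
      List.singleton_append]

-- A's outer loop = the comprehension rows plus pvMerge folded over the flat cell list
lemma pv_outer_eq (cost : List (List Int)) (basis : List (Int × Int)) (u : List (Option Int)) (v : List (Option Int)) (n : Nat) :
    ∀ (is : List Nat) (rows : List (List (Option Int))) (s : Bool × Option (Int × Int) × Int),
      is.foldl (pvAOuter cost basis u v n) (rows, s)
        = (rows ++ is.map (fun (i : Nat) => (List.range n).map (pvCellB cost basis u v i)),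
           (is.flatMap (fun (i : Nat) => (List.range n).map
              (fun (j : Nat) => ((((i : Int), (j : Int))), pvCellB cost basis u v i j)))).foldl pvMerge s) := by
  intro is
  induction is with
  | nil => intro rows s; simp
  | cons i is ih =>
    intro rows s
    simp only [List.foldl_cons, List.map_cons, List.flatMap_cons, List.foldl_append]
    rw [show pvAOuter cost basis u v n (rows, s) i
        = (rows ++ [(List.range n).map (pvCellB cost basis u v i)],
           ((List.range n).map (fun (j : Nat) => ((((i : Int), (j : Int))), pvCellB cost basis u v i j))).foldl pvMerge s) from by
      unfold pvAOuter
      rw [show ((List.range n).foldl (pvAInner cost basis u v i)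
            ([], (rows, s).2.1, (rows, s).2.2.1, (rows, s).2.2.2))
          = ((List.range n).foldl (pvAInner cost basis u v i) ([], s)) from rfl]
      rw [pv_inner_eq cost basis u v i (List.range n) [] s]
      simp]
    rw [ih]
    simp

-- folding pvMerge over all cells = folding pvMergeNeg over the filtered negatives
lemma pv_merge_filter :
    ∀ (cs : List ((Int × Int) × Option Int)) (s : Bool × Option (Int × Int) × Int),
      cs.foldl pvMerge s = (cs.filterMap pvNeg).foldl pvMergeNeg s := by
  intro cs
  induction cs with
  | nil => intro s; simp
  | cons q cs ih =>
    intro s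
    simp only [List.foldl_cons, List.filterMap_cons]
    have hq : ∀ s', pvMerge s' q = (match pvNeg q with
        | some p => pvMergeNeg s' p
        | none => s') := by
      intro s'
      unfold pvMerge pvNeg pvMergeNeg
      cases q.2 with
      | none => simp
      | some d => by_cases hd : d < 0 <;> simp [hd]
    cases hn : pvNeg q with
    | none => rw [hq, hn]; exact ih s
    | some p => rw [hq, hn]; simp only [List.foldl_cons]; exact ih _

-- on an all-negative candidate list, A's scan fold is min?'s fold through pvConv
lemma pv_fold_conv :
    ∀ (ns : List (Int × (Int × Int))), (∀ p ∈ ns, p.1 < 0) →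
      ∀ (acc : Option (Int × (Int × Int))),
        ns.foldl pvMergeNeg (pvConv acc)
          = pvConv (ns.foldl (fun a x => match a with
              | none => some x
              | some m => if x.1 < m.1 then some x else some m) acc) := by
  intro ns
  induction ns with
  | nil => intro _ acc; simp
  | cons p ns ih =>
    intro hneg acc
    have hp : p.1 < 0 := hneg p (by simp)
    simp only [List.foldl_cons]
    rw [show pvMergeNeg (pvConv acc) p = pvConv (match acc with
        | none => some p
        | some m => if p.1 < m.1 then some p else some m) from by
      unfold pvMergeNeg pvConv
      cases acc with
      | none => simp [hp]
      | some m => by_cases h : p.1 < m.1 <;> simp [h]]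
    exact ih (fun q hq => hneg q (by simp [hq])) _

-- every extracted candidate is negative
lemma pv_neg_mem (cs : List ((Int × Int) × Option Int)) :
    ∀ p ∈ cs.filterMap pvNeg, p.1 < 0 := by
  intro p hp
  rcases List.mem_filterMap.mp hp with ⟨q, _, hq⟩
  unfold pvNeg at hq
  cases h2 : q.2 with
  | none => simp [h2] at hq
  | some d =>
    rw [h2] at hq
    by_cases hd : d < 0
    · simp [hd] at hq; simpa [← hq] using hd
    · simp [hd] at hq

-- ===== VERDICT (by name: the statement is the Claim_ definition above) =====
theorem delta_table_spec : Claim_equal_delta_table := by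
  intro cost basis u v _ _
  unfold Spec_delta_table delta_table delta_table_alt
  dsimp only
  rw [pv_outer_eq]
  set n := (PySem.List.pyGetD cost 0 []).length with hn
  set cells := ((List.range cost.length).flatMap (fun (i : Nat) => (List.range n).map
      (fun (j : Nat) => ((((i : Int), (j : Int))), pvCellB cost basis u v i j)))) with hcells
  -- B's negatives list is the filterMap of pvNeg over the same flat cell list
  have hnegs : ((PySem.List.enumerate ((List.range cost.length).map
        (fun i => (List.range n).map (pvCellB cost basis u v i))) 0).flatMap (fun p =>
        (PySem.List.enumerate p.2 0).filterMap (fun q =>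
          match q.2 with
          | some d => if d < 0 then some (d, (p.1, q.1)) else none
          | none => none)))
      = cells.filterMap pvNeg := by
    rw [pv_enum_range, List.flatMap_map, hcells, List.filterMap_flatMap]
    refine List.flatMap_congr (fun i _ => ?_)
    rw [pv_enum_range, List.filterMap_map, List.filterMap_map]
    rfl
  rw [hnegs]
  rw [pv_merge_filter]
  have := pv_fold_conv (cells.filterMap pvNeg) (pv_neg_mem cells) none
  rw [show ((true : Bool), (none : Option (Int × Int)), (0 : Int)) = pvConv none from rfl, this]
  rw [show ∀ xs : List (Int × (Int × Int)), xs.foldl (fun a x => match a with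
        | none => some x
        | some m => if x.1 < m.1 then some x else some m) none
      = PySem.List.min? xs (fun t => t.1) from fun xs => by
        simp [PySem.List.min?]
        congr 1
        funext a x
        cases a <;> rfl]
  cases hmin : PySem.List.min? (cells.filterMap pvNeg) (fun t => t.1) with
  | none =>
    have : cells.filterMap pvNeg = [] := (PySem.List.min?_eq_none_iff _ _).mp hmin
    simp [this, pvConv]
  | some t =>
    have hne : cells.filterMap pvNeg ≠ [] := by
      intro h; rw [h] at hmin; simp [PySem.List.min?] at hmin
    simp [hne, pvConv]
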